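-- pv_equiv track=rewrite | github.com/rspraneeth/DSA-and-others | bitManipulations/nthMagicNumber.py | solve
-- ===== SOURCE A (Python) =====
-- def solve(A):
--     pwr = 1
--     ans = 0
--     while A > 0:
--         if A & 1 == 1:  # checking if RSB is 1, when 0 we need not do anything
--             ans += 5 ** pwr
--         A = A >> 1  # right shifting binary number, so that when RSB=1, we add 5^pow
--         pwr += 1
--     return ans
-- ===== SOURCE B (Python) =====
-- def solve(A):
--     digits = []
--     while A > 0:
--         digits.append(A & 1)
--         A >>= 1
--     result = 0
--     for b in reversed(digits):
--         result = result * 5 + b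
--     return result * 5
-- ===== Notes on version B (the rewrite author's own statement) =====
-- stated objective: alternative
-- what changed: B collects the binary digits into a list first, then evaluates them as a base-5 number by a single Horner multiply-add pass over the reversed list (times a final 5), instead of A's one loop that recomputes 5**pwr for each set bit.
import Mathlib
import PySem

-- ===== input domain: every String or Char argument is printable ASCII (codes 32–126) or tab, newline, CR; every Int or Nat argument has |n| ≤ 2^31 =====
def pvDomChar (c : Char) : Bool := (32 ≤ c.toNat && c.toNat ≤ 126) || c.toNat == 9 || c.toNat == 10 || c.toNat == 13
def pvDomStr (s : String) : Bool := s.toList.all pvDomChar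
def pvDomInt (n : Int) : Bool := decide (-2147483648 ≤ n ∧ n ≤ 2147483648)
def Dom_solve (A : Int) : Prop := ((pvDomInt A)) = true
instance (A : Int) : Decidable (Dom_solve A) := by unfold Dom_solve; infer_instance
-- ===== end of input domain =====

-- B collects the binary digits into a list, then evaluates them base-5 by one Horner pass;
-- A instead adds 5**pwr per set bit in a single loop. Objective: alternative decomposition.

-- ===== PORT A =====
-- while A > 0: if A & 1 == 1: ans += 5 ** pwr; A >>= 1; pwr += 1
def solveLoop (A : Int) (pwr : Nat) (ans : Int) : Int :=
  if _h : A > 0 then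
    solveLoop (PySem.Int.floordiv A 2) (pwr + 1)
      (if PySem.Int.mod A 2 == 1 then ans + 5 ^ pwr else ans)
  else ans
termination_by A.toNat
decreasing_by
  rw [PySem.Int.floordiv_eq_ediv_of_pos (by norm_num)]
  omega

def solve (A : Int) : Int := solveLoop A 1 0

-- ===== PORT B =====
-- while A > 0: digits.append(A & 1); A >>= 1
def digitsLoop (A : Int) (acc : List Int) : List Int :=
  if _h : A > 0 then
    digitsLoop (PySem.Int.floordiv A 2) (acc ++ [PySem.Int.mod A 2])
  else acc
termination_by A.toNat
decreasing_by
  rw [PySem.Int.floordiv_eq_ediv_of_pos (by norm_num)]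
  omega

-- result = 0; for b in reversed(digits): result = result * 5 + b; return result * 5
def solve_alt (A : Int) : Int :=
  ((digitsLoop A []).reverse.foldl (fun r b => r * 5 + b) 0) * 5

-- ===== PRECONDITION & SPEC =====
def Spec_solve (A : Int) (out : Int) : Prop := out = solve_alt A
instance (A : Int) (out : Int) : Decidable (Spec_solve A out) := by unfold Spec_solve; infer_instance

-- ===== CLAIM (what is proved, stated in full; the proofs are below) =====
def Claim_equal_solve : Prop := ∀ (A : Int), Dom_solve A → Spec_solve A (solve A)

-- ===== LEMMAS AND PROOFS =====

theorem digitsLoop_acc : ∀ (n : Nat) (A : Int), A.toNat = n →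
    ∀ (acc : List Int), digitsLoop A acc = acc ++ digitsLoop A [] := by
  intro n
  induction n using Nat.strong_induction_on with
  | _ n ih =>
    intro A hA acc
    by_cases h : A > 0
    · have e : ∀ (acc' : List Int), digitsLoop A acc'
          = digitsLoop (PySem.Int.floordiv A 2) (acc' ++ [PySem.Int.mod A 2]) := by
        intro acc'; rw [digitsLoop.eq_def]; exact dif_pos h
      have hlt : (PySem.Int.floordiv A 2).toNat < n := by
        rw [PySem.Int.floordiv_eq_ediv_of_pos (by norm_num)]; omega
      rw [e acc, e [], ih _ hlt _ rfl (acc ++ [PySem.Int.mod A 2]),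
          ih _ hlt _ rfl ([] ++ [PySem.Int.mod A 2])]
      simp
    · have e : ∀ (acc' : List Int), digitsLoop A acc' = acc' := by
        intro acc'; rw [digitsLoop.eq_def]; exact dif_neg h
      rw [e acc, e []]; simp

def hornerVal (A : Int) : Int :=
  (digitsLoop A []).reverse.foldl (fun r b => r * 5 + b) 0

theorem hornerVal_pos (A : Int) (h : A > 0) :
    hornerVal A = 5 * hornerVal (PySem.Int.floordiv A 2) + PySem.Int.mod A 2 := by
  unfold hornerVal
  have e : digitsLoop A [] = digitsLoop (PySem.Int.floordiv A 2) [PySem.Int.mod A 2] := by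
    rw [digitsLoop.eq_def]; exact dif_pos h
  rw [e, digitsLoop_acc _ _ rfl]
  simp [List.foldl_append]
  ring

theorem hornerVal_nonpos (A : Int) (h : ¬ A > 0) : hornerVal A = 0 := by
  unfold hornerVal
  rw [digitsLoop.eq_def, dif_neg h]
  simp

theorem solveLoop_eq (A : Int) (pwr : Nat) (ans : Int) :
    solveLoop A pwr ans = ans + 5 ^ pwr * hornerVal A := by
  fun_induction solveLoop A pwr ans with
  | case1 A pwr ans h ih =>
    simp only [dite_eq_ite] at ih
    rw [ih, hornerVal_pos A h]
    have hme : PySem.Int.mod A 2 = A % 2 := PySem.Int.mod_eq_emod_of_pos (by norm_num)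
    simp only [pow_succ, hme]
    rcases Int.emod_two_eq A with hm | hm <;> simp [hm] <;> ring
  | case2 A pwr ans h =>
    rw [hornerVal_nonpos A h]; ring

theorem solve_spec : Claim_equal_solve := by
  intro A _
  unfold Spec_solve solve solve_alt
  rw [solveLoop_eq]
  show 0 + 5 ^ 1 * hornerVal A = hornerVal A * 5
  ring

-- ===== VERDICT (by name: the statement is the Claim_ definition above) =====
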